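-- pv_equiv track=rewrite | github.com/EDAII/problemadamochila | problemadamochila3 (1).py | encontramenorpeso
-- ===== SOURCE A (Python) =====
-- def retornalista(posicaomenor, pesoinicial):
--     pesomenorlista=[]
--     pesomenorlista.append(posicaomenor)
--     pesomenorlista.append(pesoinicial)
--     return pesomenorlista
--
-- def encontramenorpeso(A):
--     pesoinicial=A[0][2]
--     posicao=0
--     posicaomenorpeso=0
--     for i in A:
--        if(i[2]<pesoinicial):
--          pesoinicial=i[2]
--          posicaomenorpeso=posicao
--        else:
--          if(i[2]==pesoinicial and i[1]>A[posicaomenorpeso][1]):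
--            pesoinicial=i[2]
--            posicaomenorpeso=posicao
--        posicao=posicao+1
--     return retornalista(posicaomenorpeso,pesoinicial)
-- ===== SOURCE B (Python) =====
-- def encontramenorpeso(A):
--     m = min(r[2] for r in A)
--     pos = None
--     best = None
--     for i, r in enumerate(A):
--         if r[2] == m and (pos is None or r[1] > best):
--             pos, best = i, r[1]
--     return [pos, m]
-- ===== Notes on version B (the rewrite author's own statement) =====
-- stated objective: alternative
-- what changed: replaced A's single pass that maintains the running minimum and its tie-break simultaneously (re-indexing back into A for the champion's second field) by two clean passes: builtin min over the weights, then a scan keeping (position, best second field) for rows that hit that minimum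
import Mathlib
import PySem

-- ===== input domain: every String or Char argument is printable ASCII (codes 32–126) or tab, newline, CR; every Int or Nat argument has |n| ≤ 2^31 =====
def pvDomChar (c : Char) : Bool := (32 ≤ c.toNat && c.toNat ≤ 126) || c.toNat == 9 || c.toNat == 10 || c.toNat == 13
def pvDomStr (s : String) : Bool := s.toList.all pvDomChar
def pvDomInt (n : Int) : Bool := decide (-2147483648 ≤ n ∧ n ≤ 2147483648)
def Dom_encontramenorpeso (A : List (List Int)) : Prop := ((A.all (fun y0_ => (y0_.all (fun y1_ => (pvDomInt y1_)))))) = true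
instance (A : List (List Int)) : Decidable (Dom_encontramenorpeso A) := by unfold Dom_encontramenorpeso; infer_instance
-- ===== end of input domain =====

-- B replaces A's single pass (running minimum + tie-break maintained together, re-indexing
-- back into A) by two passes: builtin min over the weights, then a scan for the earliest
-- min-weight row with strictly greatest second field; same O(n) cost, different decomposition.

-- ===== PORT A =====
def retornalista (posicaomenor pesoinicial : Int) : List Int :=
  (([] ++ [posicaomenor]) ++ [pesoinicial])

-- loop body of A's 'for i in A': state = (pesoinicial, posicao, posicaomenorpeso)
def pvLoopA (A : List (List Int)) (s : Int × Int × Int) (i : List Int) : Int × Int × Int :=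
  if PySem.List.pyGetD i 2 0 < s.1 then
    (PySem.List.pyGetD i 2 0, s.2.1 + 1, s.2.1)
  else
    if PySem.List.pyGetD i 2 0 = s.1 ∧
        PySem.List.pyGetD (PySem.List.pyGetD A s.2.2 []) 1 0 < PySem.List.pyGetD i 1 0 then
      (PySem.List.pyGetD i 2 0, s.2.1 + 1, s.2.1)
    else
      (s.1, s.2.1 + 1, s.2.2)

def encontramenorpeso (A : List (List Int)) : List Int :=
  let pesoinicial := PySem.List.pyGetD (PySem.List.pyGetD A 0 []) 2 0
  let st := A.foldl (pvLoopA A) (pesoinicial, 0, 0)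
  retornalista st.2.2 st.1

-- ===== PORT B =====
-- loop body of B's 'for i, r in enumerate(A)': state = Option (pos, best)
def pvStepB (m : Int) (s : Option (Int × Int)) (p : Int × List Int) : Option (Int × Int) :=
  if (PySem.List.pyGetD p.2 2 0 == m
      && (match s with
          | none => true
          | some q => decide (q.2 < PySem.List.pyGetD p.2 1 0))) then
    some (p.1, PySem.List.pyGetD p.2 1 0)
  else s

def encontramenorpeso_alt (A : List (List Int)) : List Int :=
  match PySem.List.min? (A.map (fun r => PySem.List.pyGetD r 2 0)) (fun y => y) with
  | none => []  -- empty A: Python's min raises ValueError here (excluded by Pre_)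
  | some m =>
    match (PySem.List.enumerate A 0).foldl (pvStepB m) none with
    | some q => [q.1, m]
    | none => []  -- unreachable for nonempty A: some row attains m

-- ===== PRECONDITION & SPEC =====
-- Pre_: A raises IndexError on an empty list or on any row shorter than 3 entries.
def Pre_encontramenorpeso (A : List (List Int)) : Prop :=
  A ≠ [] ∧ ∀ r ∈ A, 3 ≤ r.length
instance (A : List (List Int)) : Decidable (Pre_encontramenorpeso A) := by
  unfold Pre_encontramenorpeso; infer_instance

def pvWitness_encontramenorpeso : List (List Int) := [[1, 2, 3], [4, 5, 3]]

def Spec_encontramenorpeso (A : List (List Int)) (out : List Int) : Prop := out = encontramenorpeso_alt A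
instance (A : List (List Int)) (out : List Int) : Decidable (Spec_encontramenorpeso A out) := by unfold Spec_encontramenorpeso; infer_instance

-- ===== CLAIM (what is proved, stated in full; the proofs are below) =====
def Claim_equal_encontramenorpeso : Prop := ∀ (A : List (List Int)), Dom_encontramenorpeso A → Pre_encontramenorpeso A → Spec_encontramenorpeso A (encontramenorpeso A)

-- ===== LEMMAS AND PROOFS =====

-- B's scan over a list none of whose rows attains m stays at none.
lemma stepB_none_of_no_hit (m : Int) (l : List (List Int)) (k : Int)
    (h : ∀ r ∈ l, PySem.List.pyGetD r 2 0 ≠ m) :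
    (PySem.List.enumerate l k).foldl (pvStepB m) none = none := by
  induction l generalizing k with
  | nil => simp [PySem.List.enumerate_nil]
  | cons r t ih =>
    rw [PySem.List.enumerate_cons]
    have hr : PySem.List.pyGetD r 2 0 ≠ m := h r (by simp)
    have hz : pvStepB m none (k, r) = none := by simp [pvStepB, hr]
    rw [List.foldl_cons, hz]
    exact ih (k + 1) (fun x hx => h x (List.mem_cons_of_mem _ hx))

-- appending one element to a min-scan
lemma min?_id_append_singleton (xs : List Int) (x pm : Int)
    (h : PySem.List.min? xs (fun y => y) = some pm) :
    PySem.List.min? (xs ++ [x]) (fun y => y) = some (min pm x) := by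
  cases xs with
  | nil => simp [PySem.List.min?] at h
  | cons c t =>
    rw [PySem.List.min?_id_cons] at h
    rw [List.cons_append, PySem.List.min?_id_cons, List.foldl_append]
    simp_all

-- The main loop invariant: after A's loop has consumed 'done' with state
-- (pm, |done|, posm), pm is the min weight of 'done' and B's scan of 'done'
-- selects (posm, done[posm][1]); running the rest of A's loop lands in a state
-- with the same relationship to the whole of A.
lemma loopA_inv (A done rest : List (List Int)) (posm : Nat) (pm : Int)
    (hA : A = done ++ rest)
    (hposm : posm < done.length)
    (hmin : PySem.List.min? (done.map (fun r => PySem.List.pyGetD r 2 0)) (fun y => y) = some pm)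
    (hsel : (PySem.List.enumerate done 0).foldl (pvStepB pm) none
        = some ((posm : Int), PySem.List.pyGetD (done.getD posm []) 1 0)) :
    ∃ (posm' : Nat) (pm' : Int),
      rest.foldl (pvLoopA A) (pm, (done.length : Int), (posm : Int))
        = (pm', (A.length : Int), (posm' : Int))
      ∧ PySem.List.min? (A.map (fun r => PySem.List.pyGetD r 2 0)) (fun y => y) = some pm'
      ∧ (PySem.List.enumerate A 0).foldl (pvStepB pm') none
          = some ((posm' : Int), PySem.List.pyGetD (A.getD posm' []) 1 0) := by
  induction rest generalizing done posm pm with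
  | nil =>
    subst hA
    exact ⟨posm, pm, by simp, by simpa using hmin, by simpa using hsel⟩
  | cons i rest ih =>
    have hA' : A = (done ++ [i]) ++ rest := by simp [hA]
    have hback : PySem.List.pyGetD A ((posm : Nat) : Int) [] = done.getD posm [] := by
      rw [PySem.List.pyGetD_natCast, hA, List.getD_append _ _ _ _ hposm]
    have hsel' : ∀ pm', (PySem.List.enumerate (done ++ [i]) 0).foldl (pvStepB pm') none
        = pvStepB pm' ((PySem.List.enumerate done 0).foldl (pvStepB pm') none)
            ((done.length : Int), i) := by
      intro pm'
      rw [PySem.List.enumerate_append, List.foldl_append]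
      simp [PySem.List.enumerate_cons, PySem.List.enumerate_nil]
    have hgetlast : (done ++ [i]).getD done.length [] = i := by
      have := List.getD_append_right (l := done) (l' := [i]) (d := ([] : List Int))
        (n := done.length) (h := le_refl _)
      simpa using this
    have hgetkeep : (done ++ [i]).getD posm [] = done.getD posm [] :=
      List.getD_append _ _ _ _ hposm
    have hlen' : (done ++ [i]).length = done.length + 1 := by simp
    by_cases h1 : PySem.List.pyGetD i 2 0 < pm
    · -- new strict minimum at index |done|
      have hstep : pvLoopA A (pm, (done.length : Int), (posm : Int)) i
          = (PySem.List.pyGetD i 2 0, (done.length : Int) + 1, (done.length : Int)) := by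
        simp [pvLoopA, h1]
      have hnohit : ∀ r ∈ done, PySem.List.pyGetD r 2 0 ≠ PySem.List.pyGetD i 2 0 := by
        intro r hr
        have := PySem.List.min?_isMin hmin (PySem.List.pyGetD r 2 0)
          (List.mem_map_of_mem hr)
        intro he; rw [he] at this; exact absurd h1 (not_lt.mpr this)
      have hmin' : PySem.List.min? ((done ++ [i]).map (fun r => PySem.List.pyGetD r 2 0))
          (fun y => y) = some (PySem.List.pyGetD i 2 0) := by
        rw [List.map_append]
        have := min?_id_append_singleton _ (PySem.List.pyGetD i 2 0) pm hmin
        simpa [min_eq_right (le_of_lt h1)] using this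
      have hselnew : (PySem.List.enumerate (done ++ [i]) 0).foldl
          (pvStepB (PySem.List.pyGetD i 2 0)) none
          = some (((done.length : Nat) : Int),
              PySem.List.pyGetD ((done ++ [i]).getD done.length []) 1 0) := by
        rw [hsel' _, stepB_none_of_no_hit _ _ _ hnohit]
        simp [pvStepB]
      have := ih (done ++ [i]) done.length (PySem.List.pyGetD i 2 0) hA'
        (by simp) hmin' hselnew
      simpa [List.foldl_cons, hstep, hlen'] using this
    · by_cases h2 : PySem.List.pyGetD i 2 0 = pm
        ∧ PySem.List.pyGetD (done.getD posm []) 1 0 < PySem.List.pyGetD i 1 0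
      · -- same minimum, strictly better second field: champion moves to |done|
        have h22 : PySem.List.pyGetD (done[posm]?.getD []) 1 0 < PySem.List.pyGetD i 1 0 := by
          simpa [List.getD] using h2.2
        have hstep : pvLoopA A (pm, (done.length : Int), (posm : Int)) i
            = (PySem.List.pyGetD i 2 0, (done.length : Int) + 1, (done.length : Int)) := by
          simp [pvLoopA, hback, h2.1, h22]
        have hmin' : PySem.List.min? ((done ++ [i]).map (fun r => PySem.List.pyGetD r 2 0))
            (fun y => y) = some pm := by
          rw [List.map_append]
          have := min?_id_append_singleton _ (PySem.List.pyGetD i 2 0) pm hmin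
          simpa [h2.1, min_self] using this
        have hselnew : (PySem.List.enumerate (done ++ [i]) 0).foldl (pvStepB pm) none
            = some (((done.length : Nat) : Int),
                PySem.List.pyGetD ((done ++ [i]).getD done.length []) 1 0) := by
          rw [hsel' _, hsel]
          simp [pvStepB, h2.1, h22]
        have := ih (done ++ [i]) done.length pm hA' (by simp) hmin' hselnew
        simpa [List.foldl_cons, hstep, h2.1, hlen'] using this
      · -- nothing changes
        have hstep : pvLoopA A (pm, (done.length : Int), (posm : Int)) i
            = (pm, (done.length : Int) + 1, (posm : Int)) := by
          simp only [pvLoopA, if_neg h1, hback]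
          rw [if_neg h2]
        have hle : pm ≤ PySem.List.pyGetD i 2 0 := not_lt.mp h1
        have hmin' : PySem.List.min? ((done ++ [i]).map (fun r => PySem.List.pyGetD r 2 0))
            (fun y => y) = some pm := by
          rw [List.map_append]
          have := min?_id_append_singleton _ (PySem.List.pyGetD i 2 0) pm hmin
          simpa [min_eq_left hle] using this
        have hselnew : (PySem.List.enumerate (done ++ [i]) 0).foldl (pvStepB pm) none
            = some (((posm : Nat) : Int),
                PySem.List.pyGetD ((done ++ [i]).getD posm []) 1 0) := by
          rw [hsel' _, hsel, hgetkeep]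
          by_cases hw : PySem.List.pyGetD i 2 0 = pm
          · have hv : ¬ PySem.List.pyGetD (done[posm]?.getD []) 1 0 < PySem.List.pyGetD i 1 0 := by
              simpa [List.getD] using fun hv => h2 ⟨hw, hv⟩
            simp [pvStepB, hw, hv]
          · simp [pvStepB, hw]
        have := ih (done ++ [i]) posm pm hA' (by simpa using Nat.lt_succ_of_lt hposm)
          hmin' hselnew
        simpa [List.foldl_cons, hstep, hlen'] using this

-- ===== VERDICT (by name: the statement is the Claim_ definition above) =====
theorem encontramenorpeso_spec : Claim_equal_encontramenorpeso := by
  intro A _ hPre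
  obtain ⟨hne, -⟩ := hPre
  cases A with
  | nil => exact absurd rfl hne
  | cons a0 tl =>
    unfold Spec_encontramenorpeso encontramenorpeso
    have h0 : PySem.List.pyGetD (a0 :: tl) 0 [] = a0 := by
      simp [PySem.List.pyGetD_zero_cons]
    have hfirst : pvLoopA (a0 :: tl) (PySem.List.pyGetD a0 2 0, 0, 0) a0
        = (PySem.List.pyGetD a0 2 0, 1, 0) := by
      simp [pvLoopA, h0]
    have hmin0 : PySem.List.min? ([a0].map (fun r => PySem.List.pyGetD r 2 0)) (fun y => y)
        = some (PySem.List.pyGetD a0 2 0) := by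
      simp [PySem.List.min?_id_cons]
    have hsel0 : (PySem.List.enumerate [a0] 0).foldl (pvStepB (PySem.List.pyGetD a0 2 0)) none
        = some (((0 : Nat) : Int), PySem.List.pyGetD (([a0] : List (List Int)).getD 0 []) 1 0) := by
      simp [PySem.List.enumerate_cons, PySem.List.enumerate_nil, pvStepB]
    obtain ⟨posm', pm', hfold, hmin', hsel'⟩ :=
      loopA_inv (a0 :: tl) [a0] tl 0 (PySem.List.pyGetD a0 2 0) (by simp) (by simp) hmin0 hsel0
    have hfold' : (a0 :: tl).foldl (pvLoopA (a0 :: tl)) (PySem.List.pyGetD a0 2 0, 0, 0)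
        = (pm', ((a0 :: tl).length : Int), (posm' : Int)) := by
      rw [List.foldl_cons, hfirst]
      simpa using hfold
    simp only [encontramenorpeso_alt, hmin']
    rw [hsel']
    simp [h0, hfold', retornalista]
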